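-- pv_equiv track=rewrite | github.com/idansherman/final_project | utils/text_utils.py | preprocess_k_seq_lookup
-- ===== SOURCE A (Python) =====
-- from collections import defaultdict
--
-- def preprocess_k_seq_lookup(sentences, max_k):
--     """
--     Preprocesses sentences into a hash table for O(1) lookup of K-sequences.
--
--     Parameters:
--         sentences (list of lists): Preprocessed sentences.
--         max_k (int): Maximum K value for sequences.
--
--     Returns:
--         dict: A dictionary mapping each K-sequence to the list of sentences containing it.
--     """
--     k_seq_lookup = defaultdict(list)
--
--     for sentence in sentences:
--         sentence_str = " ".join(sentence)  # Convert sentence list to string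
--         for k in range(1, max_k + 1):  # Generate sequences for all k up to max_k
--             for i in range(len(sentence) - k + 1):
--                 k_seq = " ".join(sentence[i:i + k])
--                 k_seq_lookup[k_seq].append(sentence_str)  # Store sentence in hashmap
--
--     return k_seq_lookup
-- ===== SOURCE B (Python) =====
-- def preprocess_k_seq_lookup(sentences, max_k):
--     """Same mapping, built by slicing each joined sentence string at precomputed
--     word-start offsets instead of re-joining every word window."""
--     k_seq_lookup = {}
--     for sentence in sentences:
--         sentence_str = " ".join(sentence)
--         offsets = [0]
--         total = 0
--         for w in sentence:
--             total += len(w) + 1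
--             offsets.append(total)
--         n = len(sentence)
--         keys = [sentence_str[offsets[i]:offsets[i + k] - 1]
--                 for k in range(1, max_k + 1) for i in range(n - k + 1)]
--         for key in keys:
--             k_seq_lookup.setdefault(key, []).append(sentence_str)
--     return k_seq_lookup
-- ===== Notes on version B (the rewrite author's own statement) =====
-- stated objective: alternative
-- what changed: Instead of re-joining every word window sentence[i:i+k], B precomputes the character start-offset of each word in the joined sentence string once and extracts every k-sequence key as a single substring slice of it; the dict is a plain dict filled via setdefault from a flat key list instead of a defaultdict written in nested loops.
import Mathlib
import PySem

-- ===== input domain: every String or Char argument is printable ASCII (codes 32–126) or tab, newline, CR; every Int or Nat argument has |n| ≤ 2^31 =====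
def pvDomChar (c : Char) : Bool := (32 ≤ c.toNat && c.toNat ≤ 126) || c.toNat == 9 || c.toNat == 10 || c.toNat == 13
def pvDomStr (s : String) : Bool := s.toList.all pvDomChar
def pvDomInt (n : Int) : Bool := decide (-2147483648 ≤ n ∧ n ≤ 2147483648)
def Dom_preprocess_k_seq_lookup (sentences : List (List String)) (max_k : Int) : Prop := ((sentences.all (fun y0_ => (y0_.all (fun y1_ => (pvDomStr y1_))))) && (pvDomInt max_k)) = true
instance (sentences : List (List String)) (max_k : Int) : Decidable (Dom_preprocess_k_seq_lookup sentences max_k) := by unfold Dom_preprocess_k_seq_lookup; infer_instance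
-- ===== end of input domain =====

-- B replaces A's per-window " ".join(sentence[i:i+k]) by one substring slice of the prejoined
-- sentence string at precomputed word start offsets (same asymptotics, different mechanism).

-- ===== PORT A =====
def preprocess_k_seq_lookup (sentences : List (List String)) (max_k : Int) : List (String × List String) :=
  (sentences.foldl (fun (d : PySem.Dict String (List String)) sentence =>
    let sentence_str := PySem.Str.join " " sentence
    (PySem.List.pyRange 1 (max_k + 1) 1).foldl (fun d k =>
      (PySem.List.pyRange 0 ((sentence.length : Int) - k + 1) 1).foldl (fun d i =>
        let k_seq := PySem.Str.join " " (PySem.List.slice sentence (some i) (some (i + k)))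
        d.modify k_seq [] (· ++ [sentence_str])) d) d) PySem.Dict.empty).items

-- ===== PORT B =====
def preprocess_k_seq_lookup_alt (sentences : List (List String)) (max_k : Int) : List (String × List String) :=
  (sentences.foldl (fun (d : PySem.Dict String (List String)) sentence =>
    let sentence_str := PySem.Str.join " " sentence
    let offsets := (sentence.foldl (fun (p : List Int × Int) w =>
        (p.1 ++ [p.2 + PySem.Str.len w + 1], p.2 + PySem.Str.len w + 1)) ([0], 0)).1
    let n : Int := sentence.length
    let keys := (PySem.List.pyRange 1 (max_k + 1) 1).flatMap (fun k =>
      (PySem.List.pyRange 0 (n - k + 1) 1).map (fun i =>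
        PySem.Str.slice sentence_str (some (PySem.List.pyGetD offsets i 0))
          (some (PySem.List.pyGetD offsets (i + k) 0 - 1))))
    keys.foldl (fun d key => d.modify key [] (· ++ [sentence_str])) d) PySem.Dict.empty).items

-- ===== PRECONDITION & SPEC =====
def Spec_preprocess_k_seq_lookup (sentences : List (List String)) (max_k : Int) (out : List (String × List String)) : Prop := out = preprocess_k_seq_lookup_alt sentences max_k
instance (sentences : List (List String)) (max_k : Int) (out : List (String × List String)) : Decidable (Spec_preprocess_k_seq_lookup sentences max_k out) := by unfold Spec_preprocess_k_seq_lookup; infer_instance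

-- ===== CLAIM (what is proved, stated in full; the proofs are below) =====
def Claim_equal_preprocess_k_seq_lookup : Prop := ∀ (sentences : List (List String)) (max_k : Int), Dom_preprocess_k_seq_lookup sentences max_k → Spec_preprocess_k_seq_lookup sentences max_k (preprocess_k_seq_lookup sentences max_k)

-- ===== LEMMAS AND PROOFS =====

/-- total joined length contribution: each word plus one separator char. -/
def pvW (css : List (List Char)) : Nat := (css.map (fun c => c.length + 1)).sum

/-- join with a single space, on char lists. -/
def pvJ (css : List (List Char)) : List Char := PySem.Chars.join [' '] css

theorem pvW_nil : pvW [] = 0 := rfl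

theorem pvW_cons (c : List Char) (r : List (List Char)) :
    pvW (c :: r) = c.length + 1 + pvW r := by
  simp [pvW]

theorem pvW_append (a b : List (List Char)) : pvW (a ++ b) = pvW a + pvW b := by
  simp [pvW]

theorem pvW_pos (css : List (List Char)) (h : css ≠ []) : 1 ≤ pvW css := by
  cases css with
  | nil => exact absurd rfl h
  | cons c r => rw [pvW_cons]; omega

theorem pvJ_cons_cons (p q : List Char) (rest : List (List Char)) :
    pvJ (p :: q :: rest) = p ++ ' ' :: pvJ (q :: rest) := by
  have h := PySem.Chars.join_cons_cons [' '] p q rest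
  simpa [pvJ] using h

theorem pv_drop_join : ∀ (css : List (List Char)) (i : Nat),
    (pvJ css).drop (pvW (css.take i)) = pvJ (css.drop i) := by
  intro css
  induction css with
  | nil => intro i; simp [pvJ, PySem.Chars.join_nil]
  | cons c rest ih =>
    intro i
    cases i with
    | zero => simp [pvW_nil]
    | succ j =>
      cases rest with
      | nil =>
        simp only [List.take_succ_cons, List.drop_succ_cons, List.take_nil, List.drop_nil]
        rw [pvW_cons, pvW_nil]
        simp [pvJ, PySem.Chars.join_singleton, PySem.Chars.join_nil]
      | cons r rs =>
        simp only [List.take_succ_cons, List.drop_succ_cons]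
        rw [pvW_cons, pvJ_cons_cons, List.drop_append]
        have h1 : c.length + 1 + pvW ((r :: rs).take j) - c.length = pvW ((r :: rs).take j) + 1 := by omega
        have h2 : (c.drop (c.length + 1 + pvW ((r :: rs).take j))) = ([] : List Char) := by
          apply List.drop_eq_nil_of_le; omega
        rw [h1, h2]
        simp only [List.nil_append, List.drop_succ_cons]
        exact ih j

theorem pv_take_join : ∀ (css : List (List Char)) (k : Nat), 1 ≤ k → k ≤ css.length →
    (pvJ css).take (pvW (css.take k) - 1) = pvJ (css.take k) := by
  intro css
  induction css with
  | nil => intro k hk hlen; simp at hlen; omega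
  | cons c rest ih =>
    intro k hk hlen
    cases k with
    | zero => omega
    | succ j =>
      cases Nat.eq_zero_or_pos j with
      | inl hj0 =>
        subst hj0
        simp only [List.take_succ_cons, List.take_zero]
        rw [pvW_cons, pvW_nil]
        have : c.length + 1 + 0 - 1 = c.length := by omega
        rw [this]
        cases rest with
        | nil => simp [pvJ, PySem.Chars.join_singleton]
        | cons r rs =>
          rw [pvJ_cons_cons, List.take_append]
          simp [pvJ, PySem.Chars.join_singleton]
      | inr hj1 =>
        have hrest : 1 ≤ rest.length := by simp at hlen; omega
        cases rest with
        | nil => simp at hrest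
        | cons r rs =>
          simp only [List.take_succ_cons]
          rw [pvW_cons, pvJ_cons_cons]
          have hWin : 1 ≤ pvW ((r :: rs).take j) := by
            apply pvW_pos
            cases j with
            | zero => omega
            | succ j' => simp
          have harith : c.length + 1 + pvW ((r :: rs).take j) - 1
              = c.length + 1 + (pvW ((r :: rs).take j) - 1) := by omega
          rw [harith, List.take_append]
          have h2 : c.length + 1 + (pvW ((r :: rs).take j) - 1) - c.length
              = 1 + (pvW ((r :: rs).take j) - 1) := by omega
          rw [h2]
          have h3 : (c.take (c.length + 1 + (pvW ((r :: rs).take j) - 1))) = c := by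
            apply List.take_of_length_le; omega
          rw [h3]
          have h4 : (' ' :: pvJ (r :: rs)).take (1 + (pvW ((r :: rs).take j) - 1))
              = ' ' :: (pvJ (r :: rs)).take (pvW ((r :: rs).take j) - 1) := by
            rw [Nat.add_comm]; simp
          rw [h4, ih j hj1 (by simp at hlen ⊢; omega)]
          cases j with
          | zero => omega
          | succ j' =>
            simp only [List.take_succ_cons]
            rw [pvJ_cons_cons]

theorem pv_window (css : List (List Char)) (i k : Nat) (hk : 1 ≤ k) (hik : i + k ≤ css.length) :
    ((pvJ css).drop (pvW (css.take i))).take ((pvW (css.take (i + k)) - 1) - pvW (css.take i))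
      = pvJ ((css.drop i).take k) := by
  rw [pv_drop_join]
  have hsplit : css.take (i + k) = css.take i ++ (css.drop i).take k := List.take_add
  have hWnz : 1 ≤ pvW ((css.drop i).take k) := by
    apply pvW_pos
    have : ((css.drop i).take k).length = k := by
      rw [List.length_take, List.length_drop]; omega
    intro hnil
    rw [hnil] at this
    simp at this; omega
  rw [hsplit, pvW_append]
  have : pvW (css.take i) + pvW ((css.drop i).take k) - 1 - pvW (css.take i)
      = pvW ((css.drop i).take k) - 1 := by omega
  rw [this]
  exact pv_take_join (css.drop i) k hk (by rw [List.length_drop]; omega)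

/-- the offsets fold of port B, characterised. -/
theorem pv_offs_fold : ∀ (ws : List String) (acc : List Int) (t : Int),
    ws.foldl (fun (p : List Int × Int) w =>
        (p.1 ++ [p.2 + PySem.Str.len w + 1], p.2 + PySem.Str.len w + 1)) (acc, t)
      = (acc ++ (List.range ws.length).map
            (fun j => t + (pvW ((ws.take (j + 1)).map String.toList) : Int)),
         t + (pvW (ws.map String.toList) : Int)) := by
  intro ws
  induction ws with
  | nil => intro acc t; simp [pvW_nil]
  | cons w ws ih =>
    intro acc t
    simp only [List.foldl_cons]
    rw [ih]
    simp only [Prod.mk.injEq]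
    refine ⟨?_, ?_⟩
    · rw [List.length_cons, List.range_succ_eq_map, List.map_cons, List.map_map,
        List.append_assoc, List.singleton_append]
      have htail := List.map_congr_left (l := List.range ws.length)
        (f := fun j => t + PySem.Str.len w + 1 + (pvW (List.map String.toList (List.take (j + 1) ws)) : Int))
        (g := (fun j => t + (pvW (List.map String.toList (List.take (j + 1) (w :: ws))) : Int)) ∘ Nat.succ)
        (by
          intro j _
          simp only [Function.comp_apply, Nat.succ_eq_add_one, List.take_succ_cons,
            List.map_cons, pvW_cons, PySem.Str.len]
          push_cast; ring)
      rw [htail]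
      have hhead : t + PySem.Str.len w + 1
          = (fun j => t + (pvW (List.map String.toList (List.take (j + 1) (w :: ws))) : Int)) 0 := by
        simp only [List.take_succ_cons, List.take_zero, List.map_cons, List.map_nil,
          pvW_cons, pvW_nil, PySem.Str.len]
        push_cast; ring
      rw [hhead]
    · simp only [List.map_cons, pvW_cons, PySem.Str.len]
      push_cast; ring

theorem pv_offs_get (ws : List String) (i : Int) (h0 : 0 ≤ i) (h : i ≤ (ws.length : Int)) :
    PySem.List.pyGetD
        ((ws.foldl (fun (p : List Int × Int) w =>
          (p.1 ++ [p.2 + PySem.Str.len w + 1], p.2 + PySem.Str.len w + 1)) ([0], 0)).1) i 0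
      = (pvW ((ws.take i.toNat).map String.toList) : Int) := by
  rw [pv_offs_fold]
  obtain ⟨m, rfl⟩ : ∃ m : Nat, i = (m : Int) := ⟨i.toNat, (Int.toNat_of_nonneg h0).symm⟩
  rw [PySem.List.pyGetD_natCast]
  simp only [Int.toNat_natCast]
  cases m with
  | zero => simp [pvW_nil]
  | succ j =>
    have hj : j < ws.length := by exact_mod_cast (by omega : ((j : Int) + 1) ≤ (ws.length : Int))
    rw [List.getD_eq_getElem?_getD]
    rw [List.getElem?_append_right (by simp)]
    simp [hj]

theorem pv_foldl_foldl_flatMap {α β γ : Type} : ∀ (l : List α) (g : α → List β)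
    (f : γ → β → γ) (d : γ),
    l.foldl (fun d a => (g a).foldl f d) d = (l.flatMap g).foldl f d := by
  intro l
  induction l with
  | nil => intro g f d; simp
  | cons a l ih => intro g f d; simp [List.foldl_append, ih]

theorem pv_flatMap_congr {α β : Type} (l : List α) (f g : α → List β)
    (h : ∀ a ∈ l, f a = g a) : l.flatMap f = l.flatMap g := by
  induction l with
  | nil => rfl
  | cons a l ih =>
    simp only [List.flatMap_cons]
    rw [h a (List.mem_cons_self), ih (fun a ha => h a (List.mem_cons_of_mem _ ha))]

/-- the key A builds by joining a word window equals the substring B slices out. -/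
theorem pv_key_eq (ws : List String) (i k : Int) (hk : 1 ≤ k) (hi : 0 ≤ i)
    (hik : i + k ≤ (ws.length : Int)) :
    PySem.Str.join " " (PySem.List.slice ws (some i) (some (i + k)))
      = PySem.Str.slice (PySem.Str.join " " ws)
          (some (PySem.List.pyGetD
            ((ws.foldl (fun (p : List Int × Int) w =>
              (p.1 ++ [p.2 + PySem.Str.len w + 1], p.2 + PySem.Str.len w + 1)) ([0], 0)).1) i 0))
          (some (PySem.List.pyGetD
            ((ws.foldl (fun (p : List Int × Int) w =>
              (p.1 ++ [p.2 + PySem.Str.len w + 1], p.2 + PySem.Str.len w + 1)) ([0], 0)).1) (i + k) 0 - 1)) := by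
  rw [pv_offs_get ws i hi (by omega), pv_offs_get ws (i + k) (by omega) hik]
  apply String.ext
  rw [PySem.Str.toList_join, PySem.Str.toList_slice]
  have hcast : ((i + k).toNat) = i.toNat + k.toNat := by omega
  set css := ws.map String.toList with hcss
  have hlen : css.length = ws.length := by simp [hcss]
  -- LHS
  rw [PySem.List.slice_toNat ws hi (by omega)]
  have hmapdt : (List.take ((i + k).toNat - i.toNat) (List.drop i.toNat ws)).map String.toList
      = List.take k.toNat (List.drop i.toNat css) := by
    rw [List.map_take, List.map_drop, ← hcss]; congr 1; omega
  -- RHS bounds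
  have hWnn : (0 : Int) ≤ (pvW ((ws.take i.toNat).map String.toList) : Int) := by positivity
  have htk : (ws.take (i + k).toNat).map String.toList = css.take (i.toNat + k.toNat) := by
    rw [List.map_take, ← hcss, hcast]
  have hWin1 : 1 ≤ pvW (css.take (i.toNat + k.toNat)) := by
    apply pvW_pos
    have : (css.take (i.toNat + k.toNat)).length = i.toNat + k.toNat := by
      rw [List.length_take, hlen]; omega
    intro hnil; rw [hnil] at this; simp at this; omega
  have hb : (0 : Int) ≤ (pvW ((ws.take (i + k).toNat).map String.toList) : Int) - 1 := by
    rw [htk]; omega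
  unfold PySem.Chars.slice
  rw [PySem.List.slice_toNat _ hWnn hb]
  have hti : (ws.take i.toNat).map String.toList = css.take i.toNat := by
    rw [List.map_take, ← hcss]
  rw [hmapdt, hti, htk]
  have hjoin : (PySem.Str.join " " ws).toList = pvJ css := by
    rw [PySem.Str.toList_join, ← hcss]; rfl
  rw [hjoin]
  have ha : ((pvW (css.take i.toNat) : Int)).toNat = pvW (css.take i.toNat) := by
    exact Int.toNat_natCast _
  have hbn : (((pvW (css.take (i.toNat + k.toNat)) : Int)) - 1).toNat
      = pvW (css.take (i.toNat + k.toNat)) - 1 := by omega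
  rw [ha, hbn]
  have hsep : (" ".toList) = [' '] := rfl
  rw [hsep]
  exact (pv_window css i.toNat k.toNat (by omega) (by rw [hlen]; omega)).symm

/-- per-sentence body of A equals per-sentence body of B. -/
theorem pv_body_eq (max_k : Int) (d : PySem.Dict String (List String)) (sentence : List String) :
    (PySem.List.pyRange 1 (max_k + 1) 1).foldl (fun d k =>
      (PySem.List.pyRange 0 ((sentence.length : Int) - k + 1) 1).foldl (fun d i =>
        (d.modify (PySem.Str.join " " (PySem.List.slice sentence (some i) (some (i + k)))) []
          (· ++ [PySem.Str.join " " sentence]))) d) d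
    = (let sentence_str := PySem.Str.join " " sentence
       let offsets := (sentence.foldl (fun (p : List Int × Int) w =>
          (p.1 ++ [p.2 + PySem.Str.len w + 1], p.2 + PySem.Str.len w + 1)) ([0], 0)).1
       let keys := (PySem.List.pyRange 1 (max_k + 1) 1).flatMap (fun k =>
         (PySem.List.pyRange 0 ((sentence.length : Int) - k + 1) 1).map (fun i =>
           PySem.Str.slice sentence_str (some (PySem.List.pyGetD offsets i 0))
             (some (PySem.List.pyGetD offsets (i + k) 0 - 1))))
       keys.foldl (fun d key => d.modify key [] (· ++ [sentence_str])) d) := by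
  simp only []
  have h1 : (fun (d : PySem.Dict String (List String)) (k : Int) =>
      (PySem.List.pyRange 0 ((sentence.length : Int) - k + 1) 1).foldl (fun d i =>
        (d.modify (PySem.Str.join " " (PySem.List.slice sentence (some i) (some (i + k)))) []
          (· ++ [PySem.Str.join " " sentence]))) d)
    = (fun (d : PySem.Dict String (List String)) (k : Int) =>
        ((PySem.List.pyRange 0 ((sentence.length : Int) - k + 1) 1).map (fun i =>
          PySem.Str.join " " (PySem.List.slice sentence (some i) (some (i + k))))).foldl
            (fun d key => d.modify key [] (· ++ [PySem.Str.join " " sentence])) d) := by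
    funext d k
    rw [List.foldl_map]
  rw [h1, pv_foldl_foldl_flatMap]
  congr 1
  apply pv_flatMap_congr
  intro k hk
  rw [PySem.List.mem_pyRange_one] at hk
  apply List.map_congr_left
  intro i hi
  rw [PySem.List.mem_pyRange_one] at hi
  exact pv_key_eq sentence i k hk.1 hi.1 (by omega)

theorem pv_outer_eq (max_k : Int) : ∀ (sentences : List (List String))
    (d : PySem.Dict String (List String)),
    sentences.foldl (fun d sentence =>
      (PySem.List.pyRange 1 (max_k + 1) 1).foldl (fun d k =>
        (PySem.List.pyRange 0 ((sentence.length : Int) - k + 1) 1).foldl (fun d i =>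
          (d.modify (PySem.Str.join " " (PySem.List.slice sentence (some i) (some (i + k)))) []
            (· ++ [PySem.Str.join " " sentence]))) d) d) d
    = sentences.foldl (fun d sentence =>
        let sentence_str := PySem.Str.join " " sentence
        let offsets := (sentence.foldl (fun (p : List Int × Int) w =>
           (p.1 ++ [p.2 + PySem.Str.len w + 1], p.2 + PySem.Str.len w + 1)) ([0], 0)).1
        let keys := (PySem.List.pyRange 1 (max_k + 1) 1).flatMap (fun k =>
          (PySem.List.pyRange 0 ((sentence.length : Int) - k + 1) 1).map (fun i =>
            PySem.Str.slice sentence_str (some (PySem.List.pyGetD offsets i 0))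
              (some (PySem.List.pyGetD offsets (i + k) 0 - 1))))
        keys.foldl (fun d key => d.modify key [] (· ++ [sentence_str])) d) d := by
  intro sentences
  induction sentences with
  | nil => intro d; rfl
  | cons s rest ih =>
    intro d
    simp only [List.foldl_cons]
    rw [pv_body_eq max_k d s, ih]

-- ===== VERDICT (by name: the statement is the Claim_ definition above) =====
theorem preprocess_k_seq_lookup_spec : Claim_equal_preprocess_k_seq_lookup := by
  intro sentences max_k _
  unfold Spec_preprocess_k_seq_lookup preprocess_k_seq_lookup preprocess_k_seq_lookup_alt
  congr 1
  exact pv_outer_eq max_k sentences PySem.Dict.empty
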